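-- pv_equiv track=rewrite | github.com/rudderlabs/rudder-integrations-config | scripts/analyseSecretsInSourceConfig.py | check_connection_mode_support
-- ===== SOURCE A (Python) =====
-- def check_connection_mode_support(supported_connection_modes: dict) -> tuple[bool, bool]:
--     """
--     Check if destination supports device/hybrid mode and cloud mode.
--
--     Args:
--         supported_connection_modes: The supportedConnectionModes dict from db-config.json
--
--     Returns:
--         Tuple of (supports_device_or_hybrid, supports_cloud)
--     """
--     if not supported_connection_modes:
--         return False, False
--
--     has_device_or_hybrid = False
--     has_cloud = False
--
--     for source_type, modes in supported_connection_modes.items():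
--         if isinstance(modes, list):
--             if 'device' in modes or 'hybrid' in modes:
--                 has_device_or_hybrid = True
--             if 'cloud' in modes or 'hybrid' in modes:
--                 has_cloud = True
--
--     return has_device_or_hybrid, has_cloud
-- ===== SOURCE B (Python) =====
-- def check_connection_mode_support(supported_connection_modes: dict) -> tuple[bool, bool]:
--     def supports(mode):
--         return any(isinstance(modes, list) and mode in modes
--                    for modes in supported_connection_modes.values())
--     hybrid = supports('hybrid')
--     return (hybrid or supports('device'), hybrid or supports('cloud'))
-- ===== Notes on version B (the rewrite author's own statement) =====
-- stated objective: simpler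
-- what changed: Loop interchange: A makes one pass over entries updating two flags with four membership tests each; B instead answers one existence query per target mode (supports('hybrid') computed once and shared), so the iteration is organized per-mode, short-circuits, and the per-entry branching state disappears.
import Mathlib
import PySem

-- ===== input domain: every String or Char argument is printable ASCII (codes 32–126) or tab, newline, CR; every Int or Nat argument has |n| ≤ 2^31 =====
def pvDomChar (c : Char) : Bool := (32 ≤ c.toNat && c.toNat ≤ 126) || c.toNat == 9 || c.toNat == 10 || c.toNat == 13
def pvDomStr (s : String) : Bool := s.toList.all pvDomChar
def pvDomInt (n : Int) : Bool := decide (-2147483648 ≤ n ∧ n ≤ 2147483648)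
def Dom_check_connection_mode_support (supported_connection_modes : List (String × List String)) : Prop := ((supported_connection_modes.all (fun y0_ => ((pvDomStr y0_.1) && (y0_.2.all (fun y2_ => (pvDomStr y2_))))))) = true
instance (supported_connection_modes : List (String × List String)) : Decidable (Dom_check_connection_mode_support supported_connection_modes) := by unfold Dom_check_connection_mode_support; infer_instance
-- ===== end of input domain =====

-- B reorganizes A's single per-entry pass with two mutable flags into one
-- existence query per target mode ('hybrid' computed once and shared): simpler.

-- ===== PORT A =====
-- literal port: empty-dict early return, then a loop updating two flags
-- (under the List (String × List String) typing every value is a list, so the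
-- isinstance(modes, list) test is identically true and ported as the unguarded body)
def check_connection_mode_support (supported_connection_modes : List (String × List String)) : Bool × Bool :=
  if supported_connection_modes = [] then (false, false)
  else
    supported_connection_modes.foldl
      (fun (st : Bool × Bool) p =>
        let hd := if p.2.contains "device" || p.2.contains "hybrid" then true else st.1
        let hc := if p.2.contains "cloud" || p.2.contains "hybrid" then true else st.2
        (hd, hc))
      (false, false)

-- ===== PORT B =====
-- port of Source B's helper supports(mode): any(mode in modes for modes in values)
-- (the isinstance(modes, list) conjunct is identically true under this typing)
def pvSupports (supported_connection_modes : List (String × List String)) (mode : String) : Bool :=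
  supported_connection_modes.any (fun p => p.2.contains mode)

-- literal port of Source B: one query per mode, hybrid shared
def check_connection_mode_support_alt (supported_connection_modes : List (String × List String)) : Bool × Bool :=
  let hybrid := pvSupports supported_connection_modes "hybrid"
  (hybrid || pvSupports supported_connection_modes "device",
   hybrid || pvSupports supported_connection_modes "cloud")

-- ===== PRECONDITION & SPEC =====
def Spec_check_connection_mode_support (supported_connection_modes : List (String × List String)) (out : Bool × Bool) : Prop := out = check_connection_mode_support_alt supported_connection_modes
instance (supported_connection_modes : List (String × List String)) (out : Bool × Bool) : Decidable (Spec_check_connection_mode_support supported_connection_modes out) := by unfold Spec_check_connection_mode_support; infer_instance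

-- ===== CLAIM (what is proved, stated in full; the proofs are below) =====
def Claim_equal_check_connection_mode_support : Prop := ∀ (supported_connection_modes : List (String × List String)), Dom_check_connection_mode_support supported_connection_modes → Spec_check_connection_mode_support supported_connection_modes (check_connection_mode_support supported_connection_modes)

-- ===== LEMMAS AND PROOFS =====

-- A's fold computes the disjunction of the per-entry tests, or-ed onto the initial flags
theorem pvA_fold (l : List (String × List String)) (b c : Bool) :
    l.foldl
      (fun (st : Bool × Bool) p =>
        let hd := if p.2.contains "device" || p.2.contains "hybrid" then true else st.1
        let hc := if p.2.contains "cloud" || p.2.contains "hybrid" then true else st.2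
        (hd, hc))
      (b, c)
    = (b || l.any (fun p => p.2.contains "device" || p.2.contains "hybrid"),
       c || l.any (fun p => p.2.contains "cloud" || p.2.contains "hybrid")) := by
  induction l generalizing b c with
  | nil => simp
  | cons p l ih =>
    simp only [List.foldl_cons, List.any_cons, ih, Prod.mk.injEq]
    refine ⟨?_, ?_⟩ <;>
    · rw [Bool.eq_iff_iff]
      simp only [Bool.or_eq_true]
      split_ifs <;> tauto

-- any of a disjunction splits into a disjunction of anys
theorem pvAny_or {α : Type} (l : List α) (f g : α → Bool) :
    l.any (fun x => f x || g x) = (l.any f || l.any g) := by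
  induction l with
  | nil => rfl
  | cons x l ih =>
    simp only [List.any_cons, ih]
    rw [Bool.eq_iff_iff]
    simp only [Bool.or_eq_true]
    tauto

-- ===== VERDICT (by name: the statement is the Claim_ definition above) =====
theorem check_connection_mode_support_spec : Claim_equal_check_connection_mode_support := by
  intro l _
  unfold Spec_check_connection_mode_support check_connection_mode_support check_connection_mode_support_alt pvSupports
  by_cases hl : l = []
  · subst hl; decide
  · simp only [hl, if_false, pvA_fold, Bool.false_or, pvAny_or, Prod.mk.injEq]
    exact ⟨Bool.or_comm _ _, Bool.or_comm _ _⟩
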